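-- pv_equiv track=rewrite | github.com/iwang5iwang5/10-s-CCC-Practice-Log | CCC2011S3.py | crystals
-- ===== SOURCE A (Python) =====
-- def crystals(m, x):
--     if m >= 1:
--         p = pow(5, m-1)
--         lpos = x//p
--         if lpos == 0 or lpos == 4:
--             return 0
--         elif lpos == 1 or lpos == 3:
--             return p  + crystals(m-1, x%p)
--         elif lpos == 2:
--             return p*2 + crystals(m-1, x%p)
--         else:
--             return p
--     return 0
-- ===== SOURCE B (Python) =====
-- def crystals(m, x):
--     if m < 1:
--         return 0
--     total = 0
--     for i in range(m - 1, -1, -1):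
--         p = 5 ** i
--         d = x // p
--         if d == 0 or d == 4:
--             return total
--         if d == 1 or d == 3:
--             total += p
--             x %= p
--         elif d == 2:
--             total += 2 * p
--             x %= p
--         else:
--             return total + p
--     return total
-- ===== Notes on version B (the rewrite author's own statement) =====
-- stated objective: alternative
-- what changed: Replaced the top-down recursion with an explicit iterative loop over digit positions that keeps a running total and reduces x in place, with early returns on terminating digits.
import Mathlib
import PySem

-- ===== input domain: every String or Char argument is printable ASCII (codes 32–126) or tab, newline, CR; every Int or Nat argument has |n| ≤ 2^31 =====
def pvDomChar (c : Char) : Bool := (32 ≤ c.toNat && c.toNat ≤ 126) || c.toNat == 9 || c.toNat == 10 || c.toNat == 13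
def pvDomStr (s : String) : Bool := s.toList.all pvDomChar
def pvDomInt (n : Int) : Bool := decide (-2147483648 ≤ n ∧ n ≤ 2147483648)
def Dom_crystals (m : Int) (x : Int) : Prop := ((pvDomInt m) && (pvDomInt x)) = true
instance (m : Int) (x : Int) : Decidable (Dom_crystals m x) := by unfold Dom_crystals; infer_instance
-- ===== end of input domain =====

-- B replaces A's top-down recursion with an explicit iterative loop over digit
-- positions keeping a running total (objective: alternative decomposition).

-- ===== PORT A =====
-- A recurses on m; pow(5, m-1) is 5^(m-1) with m-1 ≥ 0 under the guard m ≥ 1.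
def crystals (m : Int) (x : Int) : Int :=
  if h : m ≥ 1 then
    let p : Int := 5 ^ (m - 1).toNat
    let lpos := PySem.Int.floordiv x p
    if lpos = 0 ∨ lpos = 4 then 0
    else if lpos = 1 ∨ lpos = 3 then p + crystals (m - 1) (PySem.Int.mod x p)
    else if lpos = 2 then p * 2 + crystals (m - 1) (PySem.Int.mod x p)
    else p
  else 0
termination_by m.toNat
decreasing_by all_goals omega

-- ===== PORT B =====
-- loop of Source B: n counts the remaining iterations (i = n-1 down to 0), total is the accumulator
def crystalsLoop (n : Nat) (x : Int) (total : Int) : Int :=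
  match n with
  | 0 => total
  | k + 1 =>
    let p : Int := 5 ^ k
    let d := PySem.Int.floordiv x p
    if d = 0 ∨ d = 4 then total
    else if d = 1 ∨ d = 3 then crystalsLoop k (PySem.Int.mod x p) (total + p)
    else if d = 2 then crystalsLoop k (PySem.Int.mod x p) (total + 2 * p)
    else total + p

def crystals_alt (m : Int) (x : Int) : Int :=
  if m < 1 then 0 else crystalsLoop m.toNat x 0

-- ===== PRECONDITION & SPEC =====
def Spec_crystals (m : Int) (x : Int) (out : Int) : Prop := out = crystals_alt m x
instance (m : Int) (x : Int) (out : Int) : Decidable (Spec_crystals m x out) := by unfold Spec_crystals; infer_instance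

-- ===== CLAIM (what is proved, stated in full; the proofs are below) =====
def Claim_equal_crystals : Prop := ∀ (m : Int) (x : Int), Dom_crystals m x → Spec_crystals m x (crystals m x)

-- ===== LEMMAS AND PROOFS =====

-- loop invariant: the loop adds A's value for the remaining n digits to the accumulator
theorem crystalsLoop_eq (n : Nat) : ∀ (x total : Int),
    crystalsLoop n x total = total + crystals (n : Int) x := by
  induction n with
  | zero =>
    intro x total
    simp [crystalsLoop, crystals]
  | succ k ih =>
    intro x total
    have hm : ((k + 1 : Nat) : Int) ≥ 1 := by omega
    have hsub : (((k + 1 : Nat) : Int) - 1) = (k : Int) := by push_cast; ring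
    rw [crystals]
    simp only [crystalsLoop, hm, dif_pos, hsub, Int.toNat_natCast]
    split_ifs with h1 h2 h3
    · simp
    · rw [ih]; ring
    · rw [ih]; ring
    · ring

theorem crystals_nonpos (m x : Int) (h : m < 1) : crystals m x = 0 := by
  rw [crystals]; simp [show ¬ m ≥ 1 by omega]

-- ===== VERDICT (by name: the statement is the Claim_ definition above) =====
theorem crystals_spec : Claim_equal_crystals := by
  intro m x _
  unfold Spec_crystals crystals_alt
  by_cases h : m < 1
  · rw [if_pos h, crystals_nonpos m x h]
  · rw [if_neg h, crystalsLoop_eq, Int.toNat_of_nonneg (by omega)]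
    ring
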